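-- pv_equiv track=rewrite | github.com/GSG-Robots/spike-prime-code | hypernumbers.py | lownumber
-- ===== SOURCE A (Python) =====
-- I = True
--
-- O = False
--
-- def lownumber(number):
--     if not isinstance(number, int):
--         raise TypeError("Number must be int")
--     if not 0 <= number <= 25:
--         raise ValueError("Number must be between 0 and 25")
--     return [
--         [
--             I
--             if number > x + y * 5
--             else O
--             for x in range(0, 5)
--         ]
--         for y in range(0, 5)
--     ]
-- ===== SOURCE B (Python) =====
-- def lownumber(number):
--     if not isinstance(number, int):
--         raise TypeError("Number must be int")
--     if not 0 <= number <= 25: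
--         raise ValueError("Number must be between 0 and 25")
--
--     def build(n):
--         if n == 0:
--             return [[False] * 5 for _ in range(5)]
--         grid = build(n - 1)
--         grid[(n - 1) // 5][(n - 1) % 5] = True
--         return grid
--
--     return build(number)
-- ===== Notes on version B (the rewrite author's own statement) =====
-- stated objective: alternative
-- what changed: Instead of comparing every grid cell against a threshold, B builds the grid incrementally by recursion on number: it starts from the all-False grid and switches on one cell (the next row-major position) per recursive step, touching only the True cells.
import Mathlib
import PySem

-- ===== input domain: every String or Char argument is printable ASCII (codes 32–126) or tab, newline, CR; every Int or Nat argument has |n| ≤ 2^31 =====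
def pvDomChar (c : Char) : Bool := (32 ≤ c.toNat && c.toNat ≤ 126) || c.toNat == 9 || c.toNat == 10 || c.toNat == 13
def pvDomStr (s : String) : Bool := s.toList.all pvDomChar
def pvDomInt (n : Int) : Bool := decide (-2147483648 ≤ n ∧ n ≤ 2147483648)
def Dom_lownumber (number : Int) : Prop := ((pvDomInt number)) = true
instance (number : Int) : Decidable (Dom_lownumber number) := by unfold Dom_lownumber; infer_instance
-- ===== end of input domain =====

-- B builds the grid incrementally: all-False grid, then one cell switched on per recursive step; alternative decomposition, same cost.

-- ===== PORT A =====
-- per-cell threshold comparison over a 5x5 nested comprehension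
def lownumber (number : Int) : List (List Bool) :=
  (PySem.List.pyRange 0 5 1).map (fun y =>
    (PySem.List.pyRange 0 5 1).map (fun x =>
      if number > x + y * 5 then true else false))

-- ===== PORT B =====
-- grid[r][c] = True  (Python list assignment on nested lists)
def pvSetCell (g : List (List Bool)) (r c : Nat) : List (List Bool) :=
  g.set r ((g.getD r []).set c true)

-- build(n): all-False grid for n = 0, else build(n-1) with cell (n-1) switched on
def pvBuildB : Nat → List (List Bool)
  | 0 => List.replicate 5 (List.replicate 5 false)
  | n + 1 => pvSetCell (pvBuildB n) (n / 5) (n % 5)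

def lownumber_alt (number : Int) : List (List Bool) :=
  pvBuildB number.toNat

-- ===== PRECONDITION & SPEC =====
-- Pre_ excludes exactly the inputs on which A raises ValueError (number outside 0..25)
def Pre_lownumber (number : Int) : Prop := 0 ≤ number ∧ number ≤ 25
instance (number : Int) : Decidable (Pre_lownumber number) := by unfold Pre_lownumber; infer_instance
def pvWitness_lownumber : Int := (7)

def Spec_lownumber (number : Int) (out : List (List Bool)) : Prop := out = lownumber_alt number
instance (number : Int) (out : List (List Bool)) : Decidable (Spec_lownumber number out) := by unfold Spec_lownumber; infer_instance

-- ===== CLAIM =====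
def Claim_equal_lownumber : Prop := ∀ (number : Int), Dom_lownumber number → Pre_lownumber number → Spec_lownumber number (lownumber number)

-- ===== LEMMAS AND PROOFS =====

-- ===== VERDICT =====
theorem lownumber_spec : Claim_equal_lownumber := by
  unfold Claim_equal_lownumber
  intro n _ hpre
  unfold Spec_lownumber
  obtain ⟨h0, h25⟩ := hpre
  interval_cases n <;> decide
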